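-- pv_equiv track=rewrite | github.com/myamamoto555/dynamic_programming | fibonacci/number_factors_tabulation.py | numfac
-- ===== SOURCE A (Python) =====
-- def numfac(n):
--     dp = [0] * (n+1)
--     dp[0] = 1
--     dp[1] = 1
--     dp[2] = 1
--     dp[3] = 2
--     for i in range(4, n+1):
--         dp[i] = dp[i-1] + dp[i-3] + dp[i-4]
--     return dp[n]
-- ===== SOURCE B (Python) =====
-- _M = ((1, 0, 1, 1),
--       (1, 0, 0, 0),
--       (0, 1, 0, 0),
--       (0, 0, 1, 0))
--
--
-- def _mat_mul(x, y):
--     return tuple(tuple(sum(x[i][k] * y[k][j] for k in range(4))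
--                        for j in range(4))
--                  for i in range(4))
--
--
-- def _mat_pow(m, k):
--     if k == 0:
--         return ((1, 0, 0, 0), (0, 1, 0, 0), (0, 0, 1, 0), (0, 0, 0, 1))
--     h = _mat_pow(m, k // 2)
--     hh = _mat_mul(h, h)
--     return hh if k % 2 == 0 else _mat_mul(m, hh)
--
--
-- def numfac(n):
--     rev = (2, 1, 1, 1)  # (f(3), f(2), f(1), f(0))
--     if n < 4:
--         return rev[3 - n]
--     p = _mat_pow(_M, n - 3)
--     return sum(p[0][j] * rev[j] for j in range(4))
-- ===== Notes on version B (the rewrite author's own statement) =====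
-- stated objective: faster
-- what changed: Replaces the O(n) tabulation of dp[i]=dp[i-1]+dp[i-3]+dp[i-4] by binary exponentiation (repeated squaring) of the recurrence's 4x4 companion matrix applied to the base vector of the recurrence.
import Mathlib
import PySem

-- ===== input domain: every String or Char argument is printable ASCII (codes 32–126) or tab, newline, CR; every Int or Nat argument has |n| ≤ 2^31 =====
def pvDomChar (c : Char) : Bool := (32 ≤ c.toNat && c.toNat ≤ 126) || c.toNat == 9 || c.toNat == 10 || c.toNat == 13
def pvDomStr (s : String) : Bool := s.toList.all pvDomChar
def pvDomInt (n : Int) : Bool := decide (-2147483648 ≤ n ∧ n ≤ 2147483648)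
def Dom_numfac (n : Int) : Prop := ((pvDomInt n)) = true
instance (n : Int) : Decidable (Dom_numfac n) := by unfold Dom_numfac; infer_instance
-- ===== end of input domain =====

-- B replaces A's O(n) tabulation by binary exponentiation of the recurrence's 4x4
-- companion matrix (objective: faster, measured asymptotically faster in a timing run).

-- ===== PORT A =====
-- literal transliteration of A: build dp table, seed dp[0..3], fill left to right, return dp[n].
-- pySetD/pyGetD are the total forms of Python's dp[i]=v / dp[i]; under Pre_numfac (3 ≤ n)
-- every index is in range, so they are exact there.
def numfac (n : Int) : Int :=
  let dp : List Int := List.replicate (n + 1).toNat 0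
  let dp := PySem.List.pySetD dp 0 1
  let dp := PySem.List.pySetD dp 1 1
  let dp := PySem.List.pySetD dp 2 1
  let dp := PySem.List.pySetD dp 3 2
  let dp := (PySem.List.pyRange 4 (n + 1) 1).foldl
    (fun dp i =>
      PySem.List.pySetD dp i
        (PySem.List.pyGetD dp (i - 1) 0 + PySem.List.pyGetD dp (i - 3) 0 +
          PySem.List.pyGetD dp (i - 4) 0)) dp
  PySem.List.pyGetD dp n 0

-- ===== PORT B =====
-- 4-vectors and 4x4 matrices as tuples, mirroring Source B's tuples.
abbrev PVV4 := Int × Int × Int × Int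
abbrev PVM4 := PVV4 × PVV4 × PVV4 × PVV4

-- row · column dot product (Source B's sum(x[i][k]*y[k][j] for k in range(4)))
def pvDot (a b : PVV4) : Int :=
  a.1 * b.1 + a.2.1 * b.2.1 + a.2.2.1 * b.2.2.1 + a.2.2.2 * b.2.2.2

def pvCols (y : PVM4) : PVM4 :=
  ((y.1.1, y.2.1.1, y.2.2.1.1, y.2.2.2.1),
   (y.1.2.1, y.2.1.2.1, y.2.2.1.2.1, y.2.2.2.2.1),
   (y.1.2.2.1, y.2.1.2.2.1, y.2.2.1.2.2.1, y.2.2.2.2.2.1),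
   (y.1.2.2.2, y.2.1.2.2.2, y.2.2.1.2.2.2, y.2.2.2.2.2.2))

def pvMatMul (x y : PVM4) : PVM4 :=
  let c := pvCols y
  ((pvDot x.1 c.1, pvDot x.1 c.2.1, pvDot x.1 c.2.2.1, pvDot x.1 c.2.2.2),
   (pvDot x.2.1 c.1, pvDot x.2.1 c.2.1, pvDot x.2.1 c.2.2.1, pvDot x.2.1 c.2.2.2),
   (pvDot x.2.2.1 c.1, pvDot x.2.2.1 c.2.1, pvDot x.2.2.1 c.2.2.1, pvDot x.2.2.1 c.2.2.2),
   (pvDot x.2.2.2 c.1, pvDot x.2.2.2 c.2.1, pvDot x.2.2.2 c.2.2.1, pvDot x.2.2.2 c.2.2.2))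

def pvId4 : PVM4 := ((1,0,0,0),(0,1,0,0),(0,0,1,0),(0,0,0,1))

def pvM : PVM4 := ((1,0,1,1),(1,0,0,0),(0,1,0,0),(0,0,1,0))

def pvMatPow (m : PVM4) (k : Nat) : PVM4 :=
  if h : k = 0 then pvId4
  else
    let hp := pvMatPow m (k / 2)
    let hh := pvMatMul hp hp
    if k % 2 = 0 then hh else pvMatMul m hh
termination_by k
decreasing_by exact Nat.div_lt_self (Nat.pos_of_ne_zero h) (by omega)

-- rev[3-n] is Python tuple indexing, ported exactly via pyGet? on the tuple's elements
def numfac_alt (n : Int) : Int :=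
  if n < 4 then (PySem.List.pyGet? ([2, 1, 1, 1] : List Int) (3 - n)).getD 0
  else
    let p := pvMatPow pvM (n - 3).toNat
    pvDot p.1 (2, 1, 1, 1)

-- ===== PRECONDITION & SPEC =====
-- A raises IndexError for every n < 3 (dp[3] = 2 writes past the end of the length-(n+1) table).
def Pre_numfac (n : Int) : Prop := 3 ≤ n
instance (n : Int) : Decidable (Pre_numfac n) := by unfold Pre_numfac; infer_instance
def pvWitness_numfac : Int := 5

def Spec_numfac (n : Int) (out : Int) : Prop := out = numfac_alt n
instance (n : Int) (out : Int) : Decidable (Spec_numfac n out) := by unfold Spec_numfac; infer_instance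

-- ===== CLAIM (what is proved, stated in full; the proofs are below) =====
def Claim_equal_numfac : Prop := ∀ (n : Int), Dom_numfac n → Pre_numfac n → Spec_numfac n (numfac n)
-- ===== LEMMAS AND PROOFS =====

-- the recurrence both programs tabulate
def fN : Nat → Int
  | 0 => 1
  | 1 => 1
  | 2 => 1
  | 3 => 2
  | (k+4) => fN (k+3) + fN (k+1) + fN k

-- naive matrix power, reference for the binary exponentiation
def pvPowN (m : PVM4) : Nat → PVM4
  | 0 => pvId4
  | (k+1) => pvMatMul m (pvPowN m k)

def pvMatVec (x : PVM4) (v : PVV4) : PVV4 :=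
  (pvDot x.1 v, pvDot x.2.1 v, pvDot x.2.2.1 v, pvDot x.2.2.2 v)

theorem pv_mv_mul (a b : PVM4) (v : PVV4) :
    pvMatVec (pvMatMul a b) v = pvMatVec a (pvMatVec b v) := by
  obtain ⟨⟨a11,a12,a13,a14⟩,⟨a21,a22,a23,a24⟩,⟨a31,a32,a33,a34⟩,⟨a41,a42,a43,a44⟩⟩ := a
  obtain ⟨⟨b11,b12,b13,b14⟩,⟨b21,b22,b23,b24⟩,⟨b31,b32,b33,b34⟩,⟨b41,b42,b43,b44⟩⟩ := b
  obtain ⟨v1,v2,v3,v4⟩ := v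
  simp only [pvMatVec, pvMatMul, pvCols, pvDot, Prod.mk.injEq]
  and_intros <;> ring

theorem pv_id_mul (x : PVM4) : pvMatMul pvId4 x = x := by
  obtain ⟨⟨a11,a12,a13,a14⟩,⟨a21,a22,a23,a24⟩,⟨a31,a32,a33,a34⟩,⟨a41,a42,a43,a44⟩⟩ := x
  simp only [pvMatMul, pvCols, pvDot, pvId4, Prod.mk.injEq]
  and_intros <;> ring

theorem pv_mul_assoc (a b c : PVM4) :
    pvMatMul (pvMatMul a b) c = pvMatMul a (pvMatMul b c) := by
  obtain ⟨⟨a11,a12,a13,a14⟩,⟨a21,a22,a23,a24⟩,⟨a31,a32,a33,a34⟩,⟨a41,a42,a43,a44⟩⟩ := a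
  obtain ⟨⟨b11,b12,b13,b14⟩,⟨b21,b22,b23,b24⟩,⟨b31,b32,b33,b34⟩,⟨b41,b42,b43,b44⟩⟩ := b
  obtain ⟨⟨c11,c12,c13,c14⟩,⟨c21,c22,c23,c24⟩,⟨c31,c32,c33,c34⟩,⟨c41,c42,c43,c44⟩⟩ := c
  simp only [pvMatMul, pvCols, pvDot, Prod.mk.injEq]
  and_intros <;> ring

theorem pv_powN_add (m : PVM4) (a b : Nat) :
    pvPowN m (a + b) = pvMatMul (pvPowN m a) (pvPowN m b) := by
  induction a with
  | zero => simp [pvPowN, pv_id_mul]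
  | succ a ih =>
      have : a + 1 + b = (a + b) + 1 := by omega
      rw [this, pvPowN, ih, pvPowN, pv_mul_assoc]

theorem pv_matPow_eq (m : PVM4) (k : Nat) : pvMatPow m k = pvPowN m k := by
  induction k using Nat.strong_induction_on with
  | _ k ih =>
    rw [pvMatPow]
    by_cases h0 : k = 0
    · subst h0; simp [pvPowN]
    · rw [dif_neg h0]
      have hlt : k / 2 < k := Nat.div_lt_self (Nat.pos_of_ne_zero h0) (by omega)
      rw [ih _ hlt]
      by_cases hpar : k % 2 = 0
      · rw [if_pos hpar, ← pv_powN_add]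
        congr 1
        omega
      · rw [if_neg hpar]
        have hk : k = (k / 2 + k / 2) + 1 := by omega
        conv_rhs => rw [hk, pvPowN, pv_powN_add]

theorem pv_powN_vec (k : Nat) :
    pvMatVec (pvPowN pvM k) (2, 1, 1, 1) = (fN (k+3), fN (k+2), fN (k+1), fN k) := by
  induction k with
  | zero => decide
  | succ k ih =>
      rw [pvPowN, pv_mv_mul, ih]
      have h4 : fN (k+4) = fN (k+3) + fN (k+1) + fN k := by simp [fN]
      rw [show k+1+3 = k+4 from by omega, show k+1+2 = k+3 from by omega,
        show k+1+1 = k+2 from by omega, h4]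
      simp only [pvMatVec, pvDot, pvM, Prod.mk.injEq]
      and_intros <;> ring

theorem numfac_alt_eq_fN (n : Int) (h : 3 ≤ n) : numfac_alt n = fN n.toNat := by
  by_cases h4 : n < 4
  · have : n = 3 := by omega
    subst this
    decide
  · rw [numfac_alt, if_neg h4]
    have h1 : pvDot (pvMatPow pvM (n - 3).toNat).1 (2, 1, 1, 1)
        = (pvMatVec (pvPowN pvM (n - 3).toNat) (2, 1, 1, 1)).1 := by
      rw [pv_matPow_eq]; rfl
    rw [h1, pv_powN_vec]
    have : (n - 3).toNat + 3 = n.toNat := by omega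
    rw [this]

-- ===== A-side: characterisation of the tabulation loop =====

def pvStep (dp : List Int) (i : Int) : List Int :=
  PySem.List.pySetD dp i
    (PySem.List.pyGetD dp (i - 1) 0 + PySem.List.pyGetD dp (i - 3) 0 +
      PySem.List.pyGetD dp (i - 4) 0)

def pvInit (m : Nat) : List Int :=
  PySem.List.pySetD (PySem.List.pySetD (PySem.List.pySetD
    (PySem.List.pySetD (List.replicate (m+1) (0 : Int)) 0 1) 1 1) 2 1) 3 2

theorem pvInit_len (m : Nat) : (pvInit m).length = m + 1 := by
  simp [pvInit]

theorem pvInit_getD (m : Nat) (hm : 3 ≤ m) (j : Nat) (hj : j ≤ m) :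
    (pvInit m).getD j 0 = if j ≤ 3 then fN j else 0 := by
  have h0 : ((0 : Int)) = ((0 : Nat) : Int) := by norm_num
  have h1 : ((1 : Int)) = ((1 : Nat) : Int) := by norm_num
  have h2 : ((2 : Int)) = ((2 : Nat) : Int) := by norm_num
  have h3 : ((3 : Int)) = ((3 : Nat) : Int) := by norm_num
  simp only [pvInit, h0, h1, h2, h3, PySem.List.pySetD_natCast]
  rw [List.getD_eq_getElem?_getD]
  simp only [List.getElem?_set, List.length_set, List.length_replicate,
    List.getElem?_replicate]
  have hm0 : 0 < m + 1 := by omega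
  have hm1 : 1 < m + 1 := by omega
  have hm2 : 2 < m + 1 := by omega
  have hm3 : 3 < m + 1 := by omega
  have hjm : j < m + 1 := by omega
  rcases Nat.lt_or_ge j 4 with hj4 | hj4
  · interval_cases j <;> simp [fN, hm0, hm1, hm2, hm3]
  · have hne : ¬ j ≤ 3 := by omega
    rw [if_neg hne]
    rw [if_neg (by omega), if_neg (by omega), if_neg (by omega), if_neg (by omega),
      if_pos hjm]
    rfl

theorem pv_loop (m : Nat) (hm : 3 ≤ m) :
    ∀ k : Nat, 3 ≤ k → k ≤ m →
      (((PySem.List.pyRange 4 ((k : Int) + 1) 1).foldl pvStep (pvInit m)).length = m + 1) ∧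
      (∀ j : Nat, j ≤ m →
        ((PySem.List.pyRange 4 ((k : Int) + 1) 1).foldl pvStep (pvInit m)).getD j 0 =
          if j ≤ k then fN j else 0) := by
  intro k hk3
  induction k, hk3 using Nat.le_induction with
  | base =>
      intro _
      rw [PySem.List.pyRange_one_eq_nil (by norm_num)]
      exact ⟨pvInit_len m, fun j hj => pvInit_getD m hm j hj⟩
  | succ k hk ih =>
      intro hkm
      obtain ⟨ihlen, ihget⟩ := ih (by omega)
      have hsplit : PySem.List.pyRange 4 ((k : Int) + 1 + 1) 1
          = PySem.List.pyRange 4 ((k : Int) + 1) 1 ++ [(k : Int) + 1] := by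
        exact PySem.List.pyRange_one_succ_right (by exact_mod_cast by omega)
      have hcast : ((k + 1 : Nat) : Int) + 1 = (k : Int) + 1 + 1 := by push_cast; ring
      rw [hcast, hsplit, List.foldl_append]
      set L := (PySem.List.pyRange 4 ((k : Int) + 1) 1).foldl pvStep (pvInit m) with hL
      simp only [List.foldl_cons, List.foldl_nil]
      -- compute the three reads
      have hr1 : ((k : Int) + 1 - 1) = ((k : Nat) : Int) := by ring
      have hr3 : ((k : Int) + 1 - 3) = (((k - 2 : Nat)) : Int) := by omega
      have hr4 : ((k : Int) + 1 - 4) = (((k - 3 : Nat)) : Int) := by omega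
      have hset : ((k : Int) + 1) = (((k + 1 : Nat)) : Int) := by push_cast; ring
      have hval : PySem.List.pyGetD L ((k : Int) + 1 - 1) 0 +
          PySem.List.pyGetD L ((k : Int) + 1 - 3) 0 +
          PySem.List.pyGetD L ((k : Int) + 1 - 4) 0 = fN (k + 1) := by
        rw [hr1, hr3, hr4, PySem.List.pyGetD_natCast, PySem.List.pyGetD_natCast,
          PySem.List.pyGetD_natCast, ihget k (by omega), ihget (k-2) (by omega),
          ihget (k-3) (by omega)]
        obtain ⟨j, rfl⟩ : ∃ j, k = j + 3 := ⟨k - 3, by omega⟩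
        have e1 : j + 3 - 2 = j + 1 := by omega
        have e2 : j + 3 - 3 = j := by omega
        have e3 : j + 3 + 1 = j + 4 := by omega
        rw [e1, e2, e3]
        rw [if_pos (le_refl (j+3)), if_pos (show j+1 ≤ j+3 by omega),
          if_pos (show j ≤ j+3 by omega)]
        simp [fN]
      rw [pvStep, hval, hset, PySem.List.pySetD_natCast]
      constructor
      · simp [ihlen]
      · intro j hj
        rw [List.getD_eq_getElem?_getD, List.getElem?_set, ihlen]
        by_cases hje : k + 1 = j
        · subst hje
          simp [Nat.lt_succ_of_le hj]
        · have : L.getD j 0 = if j ≤ k then fN j else 0 := ihget j hj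
          rw [if_neg hje, ← List.getD_eq_getElem?_getD, this]
          by_cases h : j ≤ k
          · rw [if_pos h, if_pos (by omega)]
          · rw [if_neg h, if_neg (by omega)]

theorem numfac_eq_fN (n : Int) (h : 3 ≤ n) : numfac n = fN n.toNat := by
  obtain ⟨m, rfl⟩ : ∃ m : Nat, n = (m : Int) := ⟨n.toNat, by omega⟩
  have hm : 3 ≤ m := by exact_mod_cast h
  have hinit : (PySem.List.pySetD (PySem.List.pySetD (PySem.List.pySetD
      (PySem.List.pySetD (List.replicate ((m : Int) + 1).toNat (0 : Int)) 0 1) 1 1) 2 1) 3 2)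
      = pvInit m := by
    rw [show ((m : Int) + 1).toNat = m + 1 from by omega, pvInit]
  have := pv_loop m hm m hm (le_refl m)
  rw [numfac]
  simp only [hinit]
  rw [PySem.List.pyGetD_natCast, show ((m : Int)).toNat = m from by omega]
  show (List.foldl pvStep (pvInit m) (PySem.List.pyRange 4 ((m : Int) + 1) 1)).getD m 0 = fN m
  rw [this.2 m le_rfl, if_pos le_rfl]

-- ===== VERDICT (by name: the statement is the Claim_ definition above) =====
theorem numfac_spec : Claim_equal_numfac := by
  intro n _ hpre
  unfold Spec_numfac
  rw [numfac_eq_fN n hpre, numfac_alt_eq_fN n hpre]
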